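-- pv_equiv track=rewrite | github.com/ofarino/Programming-Assignment-3-Highest-Value-Longest-Common-Sequence | src/main.py | highest_val_longest_common_sequence
-- ===== SOURCE A (Python) =====
-- def highest_val_longest_common_sequence(str1, str2, values):
--     m = len(str1)
--     n = len(str2)
--     # 2d arr to store highest value of longest common sequence at each point
--     dp = [[0] * (n + 1) for _ in range(m + 1)]
--     for i in range(1, m + 1):
--         for j in range(1, n + 1):
--             if str1[i - 1] == str2[j - 1]:
--                 dp[i][j] = max(dp[i - 1][j], dp[i][j - 1], dp[i - 1][j - 1] + values.get(str1[i - 1], 0))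
--             else:
--                 dp[i][j] = max(dp[i - 1][j], dp[i][j - 1])
--     # backtrack
--     i, j = m, n
--     lcs = []
--     while i > 0 and j > 0:
--         if str1[i - 1] == str2[j - 1] and dp[i][j] == dp[i - 1][j - 1] + values.get(str1[i - 1], 0):
--             lcs.append(str1[i - 1])
--             i -= 1
--             j -= 1
--         elif dp[i - 1][j] > dp[i][j - 1]:
--             i -= 1
--         else:
--             j -= 1
--     lcs.reverse()
--     return dp[m][n], ''.join(lcs)
-- ===== SOURCE B (Python) =====
-- def highest_val_longest_common_sequence(str1, str2, values):
--     # forward DP over rows of (value, lcs_string) pairs; keeps only the previous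
--     # row and needs no backtracking pass
--     n = len(str2)
--     prev = [(0, "")] * (n + 1)
--     for c in str1:
--         cur = [(0, "")]
--         for j in range(1, n + 1):
--             up = prev[j]
--             left = cur[j - 1]
--             if c == str2[j - 1]:
--                 cand = prev[j - 1][0] + values.get(c, 0)
--                 best = max(up[0], left[0], cand)
--                 if best == cand:
--                     cur.append((best, prev[j - 1][1] + c))
--                 elif up[0] > left[0]:
--                     cur.append(up)
--                 else:
--                     cur.append(left)
--             elif up[0] > left[0]:
--                 cur.append(up)
--             else:
--                 cur.append(left)
--         prev = cur
--     return prev[n]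
-- ===== Notes on version B (the rewrite author's own statement) =====
-- stated objective: alternative
-- what changed: Replaces A's two-phase algorithm (full (m+1)x(n+1) integer table then a separate backward reconstruction while-loop) with a single forward row-by-row pass over (value, lcs_string) pairs that keeps only the previous row, so the answer pair is read off directly with no backtracking and O(n) rows kept instead of the whole table.
import Mathlib
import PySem

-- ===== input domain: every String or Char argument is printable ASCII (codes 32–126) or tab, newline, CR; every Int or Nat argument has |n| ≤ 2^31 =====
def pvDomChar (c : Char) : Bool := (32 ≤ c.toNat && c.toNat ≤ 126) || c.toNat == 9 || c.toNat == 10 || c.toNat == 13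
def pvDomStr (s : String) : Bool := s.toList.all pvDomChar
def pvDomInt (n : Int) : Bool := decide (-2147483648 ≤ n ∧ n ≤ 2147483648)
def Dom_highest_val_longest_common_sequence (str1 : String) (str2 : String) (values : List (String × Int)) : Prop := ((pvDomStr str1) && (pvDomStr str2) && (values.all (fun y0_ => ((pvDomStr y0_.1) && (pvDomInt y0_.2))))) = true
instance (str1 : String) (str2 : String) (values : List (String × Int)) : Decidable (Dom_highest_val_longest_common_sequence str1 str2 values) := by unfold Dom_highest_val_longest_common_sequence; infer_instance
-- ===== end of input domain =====

-- B replaces A's full 2D int table + backward reconstruction loop by a one-pass row-by-row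
-- DP over (value, string) pairs with no backtracking (objective: alternative; return value only).

-- ===== PORT A =====
-- values.get(str1[i-1], 0): dict lookup of the one-character string, default 0 (shared by both ports)
def pvVal (values : List (String × Int)) (c : Char) : Int :=
  (PySem.Dict.ofList values).getD (String.mk [c]) 0

-- dp[i][j] read / write (indices are always in range in A)
def pvGet2 (dp : List (List Int)) (i j : Nat) : Int := (dp.getD i []).getD j 0
def pvSet2 (dp : List (List Int)) (i j : Nat) (v : Int) : List (List Int) :=
  dp.set i ((dp.getD i []).set j v)

-- the nested 'for i … for j …' fill of A's dp table
def pvFillA (s1 s2 : List Char) (values : List (String × Int)) (m n : Nat) : List (List Int) :=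
  (List.range m).foldl (fun dp i0 =>
    (List.range n).foldl (fun dp j0 =>
      let i := i0 + 1
      let j := j0 + 1
      let c1 := s1.getD (i - 1) ' '
      let c2 := s2.getD (j - 1) ' '
      let v :=
        if c1 = c2 then
          max (max (pvGet2 dp (i - 1) j) (pvGet2 dp i (j - 1)))
              (pvGet2 dp (i - 1) (j - 1) + pvVal values c1)
        else
          max (pvGet2 dp (i - 1) j) (pvGet2 dp i (j - 1))
      pvSet2 dp i j v) dp)
    (List.replicate (m + 1) (List.replicate (n + 1) 0))

-- A's 'while i > 0 and j > 0' backtracking loop (lcs accumulates appended chars)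
def pvBackA (s1 s2 : List Char) (values : List (String × Int)) (dp : List (List Int)) :
    Nat → Nat → List Char → List Char
  | i, j, lcs =>
    if h : 0 < i ∧ 0 < j then
      let c1 := s1.getD (i - 1) ' '
      let c2 := s2.getD (j - 1) ' '
      if c1 = c2 ∧ pvGet2 dp i j = pvGet2 dp (i - 1) (j - 1) + pvVal values c1 then
        pvBackA s1 s2 values dp (i - 1) (j - 1) (lcs ++ [c1])
      else if pvGet2 dp (i - 1) j > pvGet2 dp i (j - 1) then
        pvBackA s1 s2 values dp (i - 1) j lcs
      else
        pvBackA s1 s2 values dp i (j - 1) lcs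
    else lcs
  termination_by i j _ => i + j
  decreasing_by all_goals omega

def highest_val_longest_common_sequence (str1 : String) (str2 : String) (values : List (String × Int)) : Int × String :=
  let s1 := str1.toList
  let s2 := str2.toList
  let m := s1.length
  let n := s2.length
  let dp := pvFillA s1 s2 values m n
  let lcs := pvBackA s1 s2 values dp m n []
  (pvGet2 dp m n, String.mk lcs.reverse)

-- ===== PORT B =====
-- one row of B's forward pass: cur starts as [(0,"")], one (value, string) cell appended per j
def pvRowB (s2 : List Char) (values : List (String × Int)) (c : Char) (n : Nat)
    (prev : List (Int × List Char)) : List (Int × List Char) :=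
  (List.range n).foldl (fun cur j0 =>
    let j := j0 + 1
    let up := prev.getD j (0, [])
    let left := cur.getD (j - 1) (0, [])
    let cell :=
      if c = s2.getD (j - 1) ' ' then
        let cand := (prev.getD (j - 1) (0, [])).1 + pvVal values c
        let best := max (max up.1 left.1) cand
        if best = cand then (best, (prev.getD (j - 1) (0, [])).2 ++ [c])
        else if up.1 > left.1 then up else left
      else if up.1 > left.1 then up else left
    cur ++ [cell]) [(0, [])]

def highest_val_longest_common_sequence_alt (str1 : String) (str2 : String) (values : List (String × Int)) : Int × String :=
  let s2 := str2.toList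
  let n := s2.length
  let final := str1.toList.foldl (fun prev c => pvRowB s2 values c n prev)
    (List.replicate (n + 1) ((0 : Int), ([] : List Char)))
  let p := final.getD n (0, [])
  (p.1, String.mk p.2)

-- ===== PRECONDITION & SPEC =====
def Spec_highest_val_longest_common_sequence (str1 : String) (str2 : String) (values : List (String × Int)) (out : Int × String) : Prop := out = highest_val_longest_common_sequence_alt str1 str2 values
instance (str1 : String) (str2 : String) (values : List (String × Int)) (out : Int × String) : Decidable (Spec_highest_val_longest_common_sequence str1 str2 values out) := by unfold Spec_highest_val_longest_common_sequence; infer_instance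

-- ===== CLAIM (what is proved, stated in full; the proofs are below) =====
def Claim_equal_highest_val_longest_common_sequence : Prop := ∀ (str1 : String) (str2 : String) (values : List (String × Int)), Dom_highest_val_longest_common_sequence str1 str2 values → Spec_highest_val_longest_common_sequence str1 str2 values (highest_val_longest_common_sequence str1 str2 values)

-- ===== LEMMAS AND PROOFS =====

-- the common recursive specification: pvP i j = (dp value at (i,j), the string A's backtrack
-- reconstructs from (i,j), in forward order)
def pvP (s1 s2 : List Char) (values : List (String × Int)) : Nat → Nat → Int × List Char
  | 0, _ => (0, [])
  | _ + 1, 0 => (0, [])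
  | i + 1, j + 1 =>
    let c1 := s1.getD i ' '
    let up := pvP s1 s2 values i (j + 1)
    let left := pvP s1 s2 values (i + 1) j
    let diag := pvP s1 s2 values i j
    if c1 = s2.getD j ' ' then
      let cand := diag.1 + pvVal values c1
      let best := max (max up.1 left.1) cand
      if best = cand then (best, diag.2 ++ [c1])
      else if up.1 > left.1 then up else left
    else if up.1 > left.1 then up else left

-- the first component satisfies the pure max-recurrence of A's table
theorem pvP_fst (s1 s2 : List Char) (values : List (String × Int)) (i j : Nat) :
    (pvP s1 s2 values (i + 1) (j + 1)).1 =
      if s1.getD i ' ' = s2.getD j ' ' then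
        max (max (pvP s1 s2 values i (j + 1)).1 (pvP s1 s2 values (i + 1) j).1)
            ((pvP s1 s2 values i j).1 + pvVal values (s1.getD i ' '))
      else
        max (pvP s1 s2 values i (j + 1)).1 (pvP s1 s2 values (i + 1) j).1 := by
  rw [pvP]
  dsimp only
  split_ifs with h1 h2 <;> first | rfl | omega

def pvRowP (s1 s2 : List Char) (values : List (String × Int)) (n i : Nat) : List Int :=
  (List.range (n + 1)).map (fun j => (pvP s1 s2 values i j).1)

theorem pvP_zero_left (s1 s2 : List Char) (values : List (String × Int)) (j : Nat) :
    pvP s1 s2 values 0 j = (0, []) := by cases j <;> rw [pvP]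

theorem pvP_zero_right (s1 s2 : List Char) (values : List (String × Int)) (i : Nat) :
    pvP s1 s2 values i 0 = (0, []) := by cases i <;> rw [pvP]

theorem getD_set_self (xs : List Int) (k : Nat) (v : Int) (h : k < xs.length) :
    (xs.set k v).getD k 0 = v := by simp [List.getD, h]

theorem getD_set_ne (xs : List Int) (k j : Nat) (v : Int) (h : k ≠ j) :
    (xs.set k v).getD j 0 = xs.getD j 0 := by simp [List.getD, h]

theorem getD_set_ne' (xs : List (List Int)) (k j : Nat) (v : List Int) (h : k ≠ j) :
    (xs.set k v).getD j [] = xs.getD j [] := by simp [List.getD, h]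

theorem getD_set_self' (xs : List (List Int)) (k : Nat) (v : List Int) (h : k < xs.length) :
    (xs.set k v).getD k [] = v := by simp [List.getD, h]

-- proof-side name for the body of A's inner loop (definitionally the lambda in pvFillA)
def pvStepA (s1 s2 : List Char) (values : List (String × Int)) (i0 : Nat)
    (dp : List (List Int)) (j0 : Nat) : List (List Int) :=
  let i := i0 + 1
  let j := j0 + 1
  let c1 := s1.getD (i - 1) ' '
  let c2 := s2.getD (j - 1) ' '
  let v :=
    if c1 = c2 then
      max (max (pvGet2 dp (i - 1) j) (pvGet2 dp i (j - 1)))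
          (pvGet2 dp (i - 1) (j - 1) + pvVal values c1)
    else
      max (pvGet2 dp (i - 1) j) (pvGet2 dp i (j - 1))
  pvSet2 dp i j v

theorem pvFillA_eq_stepA (s1 s2 : List Char) (values : List (String × Int)) (m n : Nat) :
    pvFillA s1 s2 values m n =
      (List.range m).foldl (fun dp i0 => (List.range n).foldl (pvStepA s1 s2 values i0) dp)
        (List.replicate (m + 1) (List.replicate (n + 1) 0)) := rfl

-- the inner 'for j' loop of A fills entries 1..t of row i0+1 with the pvP values
theorem innerFill (s1 s2 : List Char) (values : List (String × Int)) (m n : Nat)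
    (i0 : Nat) (t : Nat) (ht : t ≤ n) (dp : List (List Int))
    (hlen : dp.length = m + 1) (him : i0 + 1 < m + 1)
    (hrl : (dp.getD (i0 + 1) []).length = n + 1)
    (hprev : dp.getD i0 [] = pvRowP s1 s2 values n i0)
    (hcur0 : (dp.getD (i0 + 1) []).getD 0 0 = 0) :
    ((List.range t).foldl (pvStepA s1 s2 values i0) dp).length = m + 1 ∧
      (∀ k, k ≠ i0 + 1 →
        ((List.range t).foldl (pvStepA s1 s2 values i0) dp).getD k [] = dp.getD k []) ∧
      (((List.range t).foldl (pvStepA s1 s2 values i0) dp).getD (i0 + 1) []).length = n + 1 ∧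
      (∀ j, j ≤ t →
        (((List.range t).foldl (pvStepA s1 s2 values i0) dp).getD (i0 + 1) []).getD j 0 =
          (pvP s1 s2 values (i0 + 1) j).1) := by
  induction t with
  | zero =>
    refine ⟨hlen, fun k _ => rfl, hrl, fun j hj => ?_⟩
    interval_cases j
    rw [pvP_zero_right]
    exact hcur0
  | succ t ih =>
    obtain ⟨ihlen, ihother, ihrl, ihcur⟩ := ih (by omega)
    set dpt := (List.range t).foldl (pvStepA s1 s2 values i0) dp with hdpt
    have hfold : (List.range (t + 1)).foldl (pvStepA s1 s2 values i0) dp =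
        pvStepA s1 s2 values i0 dpt t := by
      rw [List.range_succ, List.foldl_append, List.foldl_cons, List.foldl_nil]
    have hgi0 : ∀ b, b ≤ n → pvGet2 dpt i0 b = (pvP s1 s2 values i0 b).1 := by
      intro b hb
      unfold pvGet2
      rw [ihother i0 (by omega), hprev, pvRowP,
        PySem.List.getD_map_range _ _ _ _ (by omega)]
    have hrowset : (pvStepA s1 s2 values i0 dpt t).getD (i0 + 1) [] =
        (dpt.getD (i0 + 1) []).set (t + 1)
          (if s1.getD i0 ' ' = s2.getD t ' ' then
            max (max (pvGet2 dpt i0 (t + 1)) (pvGet2 dpt (i0 + 1) t))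
                (pvGet2 dpt i0 t + pvVal values (s1.getD i0 ' '))
          else max (pvGet2 dpt i0 (t + 1)) (pvGet2 dpt (i0 + 1) t)) := by
      unfold pvStepA pvSet2
      dsimp only
      rw [getD_set_self' _ _ _ (by omega)]
      simp
    have hv : (if s1.getD i0 ' ' = s2.getD t ' ' then
            max (max (pvGet2 dpt i0 (t + 1)) (pvGet2 dpt (i0 + 1) t))
                (pvGet2 dpt i0 t + pvVal values (s1.getD i0 ' '))
          else max (pvGet2 dpt i0 (t + 1)) (pvGet2 dpt (i0 + 1) t)) =
        (pvP s1 s2 values (i0 + 1) (t + 1)).1 := by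
      rw [hgi0 (t + 1) (by omega), hgi0 t (by omega)]
      have hl : pvGet2 dpt (i0 + 1) t = (pvP s1 s2 values (i0 + 1) t).1 := ihcur t (by omega)
      rw [hl, pvP_fst]
    refine ⟨?_, ?_, ?_, ?_⟩
    · rw [hfold]; unfold pvStepA pvSet2; dsimp only; simp [ihlen]
    · intro k hk
      rw [hfold]
      unfold pvStepA pvSet2
      dsimp only
      rw [getD_set_ne' _ _ _ _ (by omega)]
      exact ihother k hk
    · rw [hfold, hrowset, List.length_set]; exact ihrl
    · intro j hj
      rw [hfold, hrowset]
      rcases Nat.lt_or_ge j (t + 1) with hjt | hjt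
      · rw [getD_set_ne _ _ _ _ (by omega)]
        exact ihcur j (by omega)
      · have : j = t + 1 := by omega
        subst this
        rw [getD_set_self _ _ _ (by omega), hv]

-- rows: a list with the right length and entries is the mapped range
theorem list_eq_map_range (xs : List Int) (n : Nat) (f : Nat → Int)
    (hlen : xs.length = n + 1) (h : ∀ j, j ≤ n → xs.getD j 0 = f j) :
    xs = (List.range (n + 1)).map f := by
  apply List.ext_getElem (by simp [hlen])
  intro k h1 h2
  have hk : k ≤ n := by omega
  have := h k hk
  rw [List.getD_eq_getElem] at this
  · simpa using this

theorem pvRowP_zero (s1 s2 : List Char) (values : List (String × Int)) (n : Nat) :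
    List.replicate (n + 1) (0 : Int) = pvRowP s1 s2 values n 0 := by
  unfold pvRowP
  apply list_eq_map_range _ _ _ (by simp)
  intro j hj
  rw [pvP_zero_left]
  simp [List.getD, Nat.lt_succ_of_le hj]

-- the outer 'for i' loop of A: after i rows, rows 0..i hold pvP values, the rest are still zero
theorem outerFill (s1 s2 : List Char) (values : List (String × Int)) (m n : Nat)
    (i : Nat) (hi : i ≤ m) :
    (((List.range i).foldl (fun dp i0 => (List.range n).foldl (pvStepA s1 s2 values i0) dp)
        (List.replicate (m + 1) (List.replicate (n + 1) 0))).length = m + 1) ∧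
      (∀ k, k ≤ i →
        ((List.range i).foldl (fun dp i0 => (List.range n).foldl (pvStepA s1 s2 values i0) dp)
          (List.replicate (m + 1) (List.replicate (n + 1) 0))).getD k [] =
            pvRowP s1 s2 values n k) ∧
      (∀ k, i < k → k < m + 1 →
        ((List.range i).foldl (fun dp i0 => (List.range n).foldl (pvStepA s1 s2 values i0) dp)
          (List.replicate (m + 1) (List.replicate (n + 1) 0))).getD k [] =
            List.replicate (n + 1) 0) := by
  induction i with
  | zero =>
    refine ⟨by simp, fun k hk => ?_, fun k hk1 hk2 => ?_⟩
    · interval_cases k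
      simp only [List.range_zero, List.foldl_nil]
      rw [← pvRowP_zero]
      simp [List.getD]
    · simp [List.getD, hk2]
  | succ i ih =>
    obtain ⟨ihlen, ihdone, ihzero⟩ := ih (by omega)
    set dpi := (List.range i).foldl
      (fun dp i0 => (List.range n).foldl (pvStepA s1 s2 values i0) dp)
      (List.replicate (m + 1) (List.replicate (n + 1) 0)) with hdpi
    have hfold : (List.range (i + 1)).foldl
        (fun dp i0 => (List.range n).foldl (pvStepA s1 s2 values i0) dp)
        (List.replicate (m + 1) (List.replicate (n + 1) 0)) =
        (List.range n).foldl (pvStepA s1 s2 values i) dpi := by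
      rw [List.range_succ, List.foldl_append, List.foldl_cons, List.foldl_nil]
    have hrow : dpi.getD (i + 1) [] = List.replicate (n + 1) 0 := ihzero (i + 1) (by omega) (by omega)
    obtain ⟨flen, fother, frl, fcur⟩ := innerFill s1 s2 values m n i n (le_refl n) dpi
      ihlen (by omega) (by rw [hrow]; simp) (ihdone i (le_refl i))
      (by rw [hrow]; simp [List.getD])
    refine ⟨by rw [hfold]; exact flen, fun k hk => ?_, fun k hk1 hk2 => ?_⟩
    · rw [hfold]
      rcases Nat.lt_or_ge k (i + 1) with hki | hki
      · rw [fother k (by omega)]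
        exact ihdone k (by omega)
      · have : k = i + 1 := by omega
        subst this
        exact list_eq_map_range _ _ _ frl fcur
    · rw [hfold, fother k (by omega)]
      exact ihzero k (by omega) hk2

-- after the whole nested fill, every cell of A's table holds the pvP value
theorem fillA_correct (s1 s2 : List Char) (values : List (String × Int)) (m n : Nat)
    (i j : Nat) (hi : i ≤ m) (hj : j ≤ n) :
    pvGet2 (pvFillA s1 s2 values m n) i j = (pvP s1 s2 values i j).1 := by
  obtain ⟨_, hdone, _⟩ := outerFill s1 s2 values m n m (le_refl m)
  rw [pvFillA_eq_stepA]
  unfold pvGet2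
  rw [hdone i hi, pvRowP, PySem.List.getD_map_range _ _ _ _ (by omega)]

-- A's backtracking loop reconstructs exactly (pvP i j).2, reversed, after the accumulator
theorem backA_eq (s1 s2 : List Char) (values : List (String × Int)) (dp : List (List Int))
    (m n : Nat)
    (hdp : ∀ a b, a ≤ m → b ≤ n → pvGet2 dp a b = (pvP s1 s2 values a b).1)
    (i j : Nat) (hi : i ≤ m) (hj : j ≤ n) (lcs : List Char) :
    pvBackA s1 s2 values dp i j lcs = lcs ++ ((pvP s1 s2 values i j).2).reverse := by
  induction hs : i + j using Nat.strong_induction_on generalizing i j lcs with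
  | _ s ih =>
  subst hs
  match i, hi, j, hj with
  | 0, hi, j, hj =>
    rw [pvBackA, pvP_zero_left]
    simp
  | i + 1, hi, 0, hj =>
    rw [pvBackA, pvP_zero_right]
    simp
  | i + 1, hi, j + 1, hj =>
    rw [pvBackA]
    rw [dif_pos (by omega : 0 < i + 1 ∧ 0 < j + 1)]
    simp only [Nat.add_sub_cancel]
    rw [hdp (i + 1) (j + 1) hi hj, hdp i j (by omega) (by omega),
      hdp i (j + 1) (by omega) hj, hdp (i + 1) j hi (by omega)]
    by_cases hc : s1.getD i ' ' = s2.getD j ' '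
    · by_cases heq : (pvP s1 s2 values (i + 1) (j + 1)).1 =
          (pvP s1 s2 values i j).1 + pvVal values (s1.getD i ' ')
      · rw [if_pos ⟨hc, heq⟩]
        have hbest : max (max (pvP s1 s2 values i (j + 1)).1 (pvP s1 s2 values (i + 1) j).1)
            ((pvP s1 s2 values i j).1 + pvVal values (s1.getD i ' ')) =
            (pvP s1 s2 values i j).1 + pvVal values (s1.getD i ' ') := by
          have := pvP_fst s1 s2 values i j
          rw [if_pos hc] at this
          omega
        have hsnd : (pvP s1 s2 values (i + 1) (j + 1)).2 =
            (pvP s1 s2 values i j).2 ++ [s1.getD i ' '] := by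
          rw [pvP]
          dsimp only
          rw [if_pos hc, if_pos hbest]
        rw [ih (i + j) (by omega) i j (by omega) (by omega) (lcs ++ [s1.getD i ' ']) rfl,
          hsnd]
        simp
      · rw [if_neg (by
          intro hco
          exact heq hco.2)]
        have hne : max (max (pvP s1 s2 values i (j + 1)).1 (pvP s1 s2 values (i + 1) j).1)
            ((pvP s1 s2 values i j).1 + pvVal values (s1.getD i ' ')) ≠
            (pvP s1 s2 values i j).1 + pvVal values (s1.getD i ' ') := by
          have := pvP_fst s1 s2 values i j
          rw [if_pos hc] at this
          omega
        have hP : pvP s1 s2 values (i + 1) (j + 1) =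
            if (pvP s1 s2 values i (j + 1)).1 > (pvP s1 s2 values (i + 1) j).1 then
              pvP s1 s2 values i (j + 1) else pvP s1 s2 values (i + 1) j := by
          rw [pvP]
          dsimp only
          rw [if_pos hc, if_neg hne]
        by_cases hgt : (pvP s1 s2 values i (j + 1)).1 > (pvP s1 s2 values (i + 1) j).1
        · rw [if_pos hgt, ih (i + (j + 1)) (by omega) i (j + 1) (by omega) hj lcs rfl,
            hP, if_pos hgt]
        · rw [if_neg hgt, ih (i + 1 + j) (by omega) (i + 1) j hi (by omega) lcs rfl,
            hP, if_neg hgt]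
    · rw [if_neg (by
        intro hco
        exact hc hco.1)]
      have hP : pvP s1 s2 values (i + 1) (j + 1) =
          if (pvP s1 s2 values i (j + 1)).1 > (pvP s1 s2 values (i + 1) j).1 then
            pvP s1 s2 values i (j + 1) else pvP s1 s2 values (i + 1) j := by
        rw [pvP]
        dsimp only
        rw [if_neg hc]
      by_cases hgt : (pvP s1 s2 values i (j + 1)).1 > (pvP s1 s2 values (i + 1) j).1
      · rw [if_pos hgt, ih (i + (j + 1)) (by omega) i (j + 1) (by omega) hj lcs rfl,
          hP, if_pos hgt]
      · rw [if_neg hgt, ih (i + 1 + j) (by omega) (i + 1) j hi (by omega) lcs rfl,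
          hP, if_neg hgt]

-- B's row fold computes the pvP row of pairs (cur after t inner steps is the row prefix)
theorem rowB_partial (s1 s2 : List Char) (values : List (String × Int)) (n : Nat)
    (i : Nat) (t : Nat) (ht : t ≤ n) :
    (List.range t).foldl (fun cur j0 =>
      let j := j0 + 1
      let up := ((List.range (n + 1)).map (pvP s1 s2 values i)).getD j (0, [])
      let left := cur.getD (j - 1) (0, [])
      let cell :=
        if s1.getD i ' ' = s2.getD (j - 1) ' ' then
          let cand := (((List.range (n + 1)).map (pvP s1 s2 values i)).getD (j - 1) (0, [])).1 +
            pvVal values (s1.getD i ' ')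
          let best := max (max up.1 left.1) cand
          if best = cand then
            (best, (((List.range (n + 1)).map (pvP s1 s2 values i)).getD (j - 1) (0, [])).2 ++
              [s1.getD i ' '])
          else if up.1 > left.1 then up else left
        else if up.1 > left.1 then up else left
      cur ++ [cell]) [(0, [])] =
      (List.range (t + 1)).map (pvP s1 s2 values (i + 1)) := by
  induction t with
  | zero =>
    simp [List.range_succ]
    rw [pvP_zero_right]
  | succ t iht =>
    rw [show List.range (t + 1) = List.range t ++ [t] from List.range_succ,
      List.foldl_append, List.foldl_cons, List.foldl_nil, iht (by omega)]
    simp only [Nat.add_sub_cancel]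
    rw [PySem.List.getD_map_range _ _ _ _ (by omega : t + 1 < n + 1),
      PySem.List.getD_map_range _ _ _ _ (by omega : t < n + 1),
      PySem.List.getD_map_range _ _ _ _ (by omega : t < t + 1)]
    have hcell : (pvP s1 s2 values (i + 1) (t + 1)) =
        (if s1.getD i ' ' = s2.getD t ' ' then
          let cand := (pvP s1 s2 values i t).1 + pvVal values (s1.getD i ' ')
          let best := max (max (pvP s1 s2 values i (t + 1)).1 (pvP s1 s2 values (i + 1) t).1) cand
          if best = cand then (best, (pvP s1 s2 values i t).2 ++ [s1.getD i ' '])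
          else if (pvP s1 s2 values i (t + 1)).1 > (pvP s1 s2 values (i + 1) t).1 then
            pvP s1 s2 values i (t + 1) else pvP s1 s2 values (i + 1) t
        else if (pvP s1 s2 values i (t + 1)).1 > (pvP s1 s2 values (i + 1) t).1 then
          pvP s1 s2 values i (t + 1) else pvP s1 s2 values (i + 1) t) := by
      rw [pvP]
    rw [← hcell, show List.range (t + 1 + 1) = List.range (t + 1) ++ [t + 1] from List.range_succ]
    simp

theorem rowB_eq (s1 s2 : List Char) (values : List (String × Int)) (n : Nat)
    (i : Nat) :
    pvRowB s2 values (s1.getD i ' ') n ((List.range (n + 1)).map (pvP s1 s2 values i)) =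
      (List.range (n + 1)).map (pvP s1 s2 values (i + 1)) := by
  unfold pvRowB
  exact rowB_partial s1 s2 values n i n (le_refl n)

theorem loopB_eq (s1 s2 : List Char) (values : List (String × Int)) (n : Nat)
    (rest : List Char) (k : Nat) (hk : s1.drop k = rest)
    (hklen : k ≤ s1.length) :
    rest.foldl (fun prev c => pvRowB s2 values c n prev)
        ((List.range (n + 1)).map (pvP s1 s2 values k)) =
      (List.range (n + 1)).map (pvP s1 s2 values s1.length) := by
  induction rest generalizing k with
  | nil =>
    have hlen : s1.length - k = 0 := by
      have := congrArg List.length hk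
      simpa using this
    have : k = s1.length := by omega
    subst this
    rw [List.foldl_nil]
  | cons c rest ihr =>
    have hklt : k < s1.length := by
      by_contra h
      rw [List.drop_eq_nil_iff.mpr (by omega)] at hk
      exact List.cons_ne_nil c rest hk.symm
    have hc : s1.getD k ' ' = c := by
      rw [List.getD_eq_getElem _ _ hklt]
      have h2 : (s1.drop k)[0]'(by rw [hk]; simp) = c := by
        simp [hk]
      rw [List.getElem_drop] at h2
      simpa using h2
    have hrest : s1.drop (k + 1) = rest := by
      rw [← List.tail_drop, hk]
      rfl
    rw [List.foldl_cons, ← hc, rowB_eq s1 s2 values n k]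
    exact ihr (k + 1) hrest (by omega)

-- B's initial row of pairs is the pvP row 0
theorem rowPairs_zero (s1 s2 : List Char) (values : List (String × Int)) (n : Nat) :
    List.replicate (n + 1) ((0 : Int), ([] : List Char)) =
      (List.range (n + 1)).map (pvP s1 s2 values 0) := by
  apply List.ext_getElem (by simp)
  intro kk h1 h2
  simp only [List.getElem_replicate, List.getElem_map, List.getElem_range]
  rw [pvP_zero_left]

-- ===== VERDICT (by name: the statement is the Claim_ definition above) =====
theorem highest_val_longest_common_sequence_spec : Claim_equal_highest_val_longest_common_sequence := by
  intro str1 str2 values _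
  unfold Spec_highest_val_longest_common_sequence
  unfold highest_val_longest_common_sequence highest_val_longest_common_sequence_alt
  dsimp only
  have hfill : ∀ a b, a ≤ str1.toList.length → b ≤ str2.toList.length →
      pvGet2 (pvFillA str1.toList str2.toList values str1.toList.length str2.toList.length) a b =
        (pvP str1.toList str2.toList values a b).1 := fun a b ha hb =>
    fillA_correct str1.toList str2.toList values _ _ a b ha hb
  have hback := backA_eq str1.toList str2.toList values
    (pvFillA str1.toList str2.toList values str1.toList.length str2.toList.length)
    str1.toList.length str2.toList.length hfill
    str1.toList.length str2.toList.length (le_refl _) (le_refl _) []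
  have hB : str1.toList.foldl (fun prev c => pvRowB str2.toList values c str2.toList.length prev)
      (List.replicate (str2.toList.length + 1) ((0 : Int), ([] : List Char))) =
      (List.range (str2.toList.length + 1)).map
        (pvP str1.toList str2.toList values str1.toList.length) := by
    rw [rowPairs_zero str1.toList str2.toList values]
    exact loopB_eq str1.toList str2.toList values _ str1.toList 0 List.drop_zero
      (by omega)
  rw [hback, hB,
    PySem.List.getD_map_range _ _ _ _ (by omega : str2.toList.length < str2.toList.length + 1),
    hfill _ _ (le_refl _) (le_refl _)]
  simp
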